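-- pv_equiv track=rewrite | github.com/niallrowantree/volve-drilling-prediction | 01_parse_witsml.py | build_canonical_map
-- ===== SOURCE A (Python) =====
-- CHANNEL_MAP = {
--     "rop":     ["ROP", "ROP5", "ROP30s", "ROP2M", "GS_ROP", "QROP"],
--     "wob":     ["SWOB", "CWOB", "GS_SWOB", "DWOB_RT", "DWOB_RAW_RT"],
--     "rpm":     ["RPM", "DRPM", "TRPM_RT", "CRPM_RT", "DRPM30s", "Bit_RPM"],
--     "spp":     ["SPPA", "SPP", "GS_SPPA", "SIG_SPP5s"],
--     "flow_in": ["TFLO", "FLOWIN", "FLOW-TRPM"],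
--     "torque":  ["TQA", "ACTC", "TORQUE_AVG", "TRQ"],
--     "ecd":     ["ECD_CT_FPWD", "ACTECDM", "ECD_ARC_RT", "ECD_ECO_RT"],
--     "hkld":    ["HKLD"],
--     "dmea":    ["DMEA", "DBTM", "DEPTH", "DEPT"],
--     "bpos":    ["BPOS"],
--     "spm1":    ["SPM1"],
--     "spm2":    ["SPM2"],
--     "spm3":    ["SPM3"],
--     "mwti":    ["MWTI"],
-- }
--
-- def build_canonical_map(mnemonics):
--     """Map canonical names to the highest-priority matching source mnemonic."""
--     mnem_set = set(mnemonics)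
--     result = {}
--     for canon, candidates in CHANNEL_MAP.items():
--         for c in candidates:
--             if c in mnem_set:
--                 result[canon] = c
--                 break
--     return result
-- ===== SOURCE B (Python) =====
-- # B: a flattened, precomputed reverse priority index (mnemonic -> (canon, priority)) plus a
-- # canon order list, replacing A's nested scan of CHANNEL_MAP against a set of the input;
-- # single pass over the input keeping the best (lowest) priority per canon.
--
-- _CANON_ORDER = ["rop", "wob", "rpm", "spp", "flow_in", "torque", "ecd",
--                 "hkld", "dmea", "bpos", "spm1", "spm2", "spm3", "mwti"]
--
-- _INDEX = {
--     "ROP": ("rop", 0),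
--     "ROP5": ("rop", 1),
--     "ROP30s": ("rop", 2),
--     "ROP2M": ("rop", 3),
--     "GS_ROP": ("rop", 4),
--     "QROP": ("rop", 5),
--     "SWOB": ("wob", 0),
--     "CWOB": ("wob", 1),
--     "GS_SWOB": ("wob", 2),
--     "DWOB_RT": ("wob", 3),
--     "DWOB_RAW_RT": ("wob", 4),
--     "RPM": ("rpm", 0),
--     "DRPM": ("rpm", 1),
--     "TRPM_RT": ("rpm", 2),
--     "CRPM_RT": ("rpm", 3),
--     "DRPM30s": ("rpm", 4),
--     "Bit_RPM": ("rpm", 5),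
--     "SPPA": ("spp", 0),
--     "SPP": ("spp", 1),
--     "GS_SPPA": ("spp", 2),
--     "SIG_SPP5s": ("spp", 3),
--     "TFLO": ("flow_in", 0),
--     "FLOWIN": ("flow_in", 1),
--     "FLOW-TRPM": ("flow_in", 2),
--     "TQA": ("torque", 0),
--     "ACTC": ("torque", 1),
--     "TORQUE_AVG": ("torque", 2),
--     "TRQ": ("torque", 3),
--     "ECD_CT_FPWD": ("ecd", 0),
--     "ACTECDM": ("ecd", 1),
--     "ECD_ARC_RT": ("ecd", 2),
--     "ECD_ECO_RT": ("ecd", 3),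
--     "HKLD": ("hkld", 0),
--     "DMEA": ("dmea", 0),
--     "DBTM": ("dmea", 1),
--     "DEPTH": ("dmea", 2),
--     "DEPT": ("dmea", 3),
--     "BPOS": ("bpos", 0),
--     "SPM1": ("spm1", 0),
--     "SPM2": ("spm2", 0),
--     "SPM3": ("spm3", 0),
--     "MWTI": ("mwti", 0),}
--
-- def build_canonical_map(mnemonics):
--     """Map canonical names to the highest-priority matching source mnemonic."""
--     best = {}
--     for m in mnemonics:
--         hit = _INDEX.get(m)
--         if hit is None:
--             continue
--         canon, i = hit
--         cur = best.get(canon)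
--         if cur is None or i < cur[1]:
--             best[canon] = (m, i)
--     return {canon: best[canon][0] for canon in _CANON_ORDER if canon in best}
-- ===== Notes on version B (the rewrite author's own statement) =====
-- stated objective: alternative
-- what changed: Replaces A's per-canon scan of candidate lists against a set of the input by a flattened precomputed reverse index (mnemonic -> (canon, priority)) plus an explicit canon-order list, with a single pass over the input keeping the lowest priority per canon.
import Mathlib
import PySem

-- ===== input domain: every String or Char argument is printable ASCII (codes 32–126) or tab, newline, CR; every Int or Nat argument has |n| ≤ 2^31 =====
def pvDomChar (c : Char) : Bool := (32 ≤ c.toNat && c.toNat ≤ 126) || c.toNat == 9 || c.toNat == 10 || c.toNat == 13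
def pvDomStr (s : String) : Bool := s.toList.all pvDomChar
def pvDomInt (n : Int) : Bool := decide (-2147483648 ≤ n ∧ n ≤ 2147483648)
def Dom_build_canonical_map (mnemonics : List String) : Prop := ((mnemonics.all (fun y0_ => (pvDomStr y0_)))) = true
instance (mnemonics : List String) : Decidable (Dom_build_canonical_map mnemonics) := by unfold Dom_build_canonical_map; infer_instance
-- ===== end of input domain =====

-- B replaces A's nested scan of CHANNEL_MAP candidate lists against a set of the input by a
-- flattened precomputed reverse index (mnemonic -> (canon, priority)) plus a canon-order list,
-- and one best-priority pass over the input; same return value (alternative decomposition, no speed claim).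

-- ===== PORT A =====
def CHANNEL_MAP : List (String × List String) := [
  ("rop",     ["ROP", "ROP5", "ROP30s", "ROP2M", "GS_ROP", "QROP"]),
  ("wob",     ["SWOB", "CWOB", "GS_SWOB", "DWOB_RT", "DWOB_RAW_RT"]),
  ("rpm",     ["RPM", "DRPM", "TRPM_RT", "CRPM_RT", "DRPM30s", "Bit_RPM"]),
  ("spp",     ["SPPA", "SPP", "GS_SPPA", "SIG_SPP5s"]),
  ("flow_in", ["TFLO", "FLOWIN", "FLOW-TRPM"]),
  ("torque",  ["TQA", "ACTC", "TORQUE_AVG", "TRQ"]),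
  ("ecd",     ["ECD_CT_FPWD", "ACTECDM", "ECD_ARC_RT", "ECD_ECO_RT"]),
  ("hkld",    ["HKLD"]),
  ("dmea",    ["DMEA", "DBTM", "DEPTH", "DEPT"]),
  ("bpos",    ["BPOS"]),
  ("spm1",    ["SPM1"]),
  ("spm2",    ["SPM2"]),
  ("spm3",    ["SPM3"]),
  ("mwti",    ["MWTI"])]

-- inner loop 'for c in candidates: if c in mnem_set: result[canon] = c; break'
def pvFindCand (mnem_set : PySem.Set String) : List String → Option String
  | [] => none
  | c :: rest => if PySem.Set.contains mnem_set c then some c else pvFindCand mnem_set rest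

def build_canonical_map (mnemonics : List String) : List (String × String) :=
  let mnem_set := PySem.Set.ofList mnemonics
  let result : PySem.Dict String String :=
    CHANNEL_MAP.foldl (fun result p =>
      match pvFindCand mnem_set p.2 with
      | some c => result.insert p.1 c
      | none => result) PySem.Dict.empty
  result.items

-- ===== PORT B =====
-- _CANON_ORDER
def pvCanonOrder : List String :=
  ["rop", "wob", "rpm", "spp", "flow_in", "torque", "ecd",
   "hkld", "dmea", "bpos", "spm1", "spm2", "spm3", "mwti"]

-- _INDEX, a dict literal
def pvIndex : PySem.Dict String (String × Int) := PySem.Dict.ofList [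
  ("ROP", ("rop", 0)),
  ("ROP5", ("rop", 1)),
  ("ROP30s", ("rop", 2)),
  ("ROP2M", ("rop", 3)),
  ("GS_ROP", ("rop", 4)),
  ("QROP", ("rop", 5)),
  ("SWOB", ("wob", 0)),
  ("CWOB", ("wob", 1)),
  ("GS_SWOB", ("wob", 2)),
  ("DWOB_RT", ("wob", 3)),
  ("DWOB_RAW_RT", ("wob", 4)),
  ("RPM", ("rpm", 0)),
  ("DRPM", ("rpm", 1)),
  ("TRPM_RT", ("rpm", 2)),
  ("CRPM_RT", ("rpm", 3)),
  ("DRPM30s", ("rpm", 4)),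
  ("Bit_RPM", ("rpm", 5)),
  ("SPPA", ("spp", 0)),
  ("SPP", ("spp", 1)),
  ("GS_SPPA", ("spp", 2)),
  ("SIG_SPP5s", ("spp", 3)),
  ("TFLO", ("flow_in", 0)),
  ("FLOWIN", ("flow_in", 1)),
  ("FLOW-TRPM", ("flow_in", 2)),
  ("TQA", ("torque", 0)),
  ("ACTC", ("torque", 1)),
  ("TORQUE_AVG", ("torque", 2)),
  ("TRQ", ("torque", 3)),
  ("ECD_CT_FPWD", ("ecd", 0)),
  ("ACTECDM", ("ecd", 1)),
  ("ECD_ARC_RT", ("ecd", 2)),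
  ("ECD_ECO_RT", ("ecd", 3)),
  ("HKLD", ("hkld", 0)),
  ("DMEA", ("dmea", 0)),
  ("DBTM", ("dmea", 1)),
  ("DEPTH", ("dmea", 2)),
  ("DEPT", ("dmea", 3)),
  ("BPOS", ("bpos", 0)),
  ("SPM1", ("spm1", 0)),
  ("SPM2", ("spm2", 0)),
  ("SPM3", ("spm3", 0)),
  ("MWTI", ("mwti", 0))]

-- loop body of B's single pass over the input mnemonics
def pvStep (best : PySem.Dict String (String × Int)) (m : String) : PySem.Dict String (String × Int) :=
  match pvIndex.get? m with
  | none => best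
  | some (canon, i) =>
    match best.get? canon with
    | none => best.insert canon (m, i)
    | some cur => if i < cur.2 then best.insert canon (m, i) else best

def build_canonical_map_alt (mnemonics : List String) : List (String × String) :=
  let best := mnemonics.foldl pvStep PySem.Dict.empty
  -- {canon: best[canon][0] for canon in _CANON_ORDER if canon in best}
  pvCanonOrder.filterMap (fun k => (best.get? k).map (fun v => (k, v.1)))

-- ===== PRECONDITION & SPEC =====
def Spec_build_canonical_map (mnemonics : List String) (out : List (String × String)) : Prop := out = build_canonical_map_alt mnemonics
instance (mnemonics : List String) (out : List (String × String)) : Decidable (Spec_build_canonical_map mnemonics out) := by unfold Spec_build_canonical_map; infer_instance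

-- ===== CLAIM (what is proved, stated in full; the proofs are below) =====
def Claim_equal_build_canonical_map : Prop := ∀ (mnemonics : List String), Dom_build_canonical_map mnemonics → Spec_build_canonical_map mnemonics (build_canonical_map mnemonics)

-- ===== LEMMAS AND PROOFS =====

-- concrete facts about CHANNEL_MAP
theorem pvFlatNodup : (CHANNEL_MAP.flatMap (·.2)).Nodup := by decide
theorem pvKeysNodup : (CHANNEL_MAP.map (·.1)).Nodup := by decide
theorem pvCandsNodup : ∀ q ∈ CHANNEL_MAP, q.2.Nodup := by decide

-- bridges between B's flattened literals and CHANNEL_MAP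
def pvBuildIndex (cm : List (String × List String)) : PySem.Dict String (String × Int) :=
  cm.foldl (fun d p =>
    (PySem.List.enumerate p.2).foldl (fun d ic => d.insert ic.2 (p.1, ic.1)) d) PySem.Dict.empty

set_option maxRecDepth 4000 in
theorem pvIndexEq : pvIndex = pvBuildIndex CHANNEL_MAP := by decide
theorem pvCanonEq : pvCanonOrder = CHANNEL_MAP.map (·.1) := by decide

-- the common target value: for each canon in order, the first candidate occurring in the input
def pvTarget (mnemonics : List String) : List (String × String) :=
  CHANNEL_MAP.filterMap (fun p => (p.2.find? (fun c => mnemonics.contains c)).map (fun c => (p.1, c)))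

-- per-canon value B's pass must reach after the input mnemonics `seen`
def pvBspec (cands seen : List String) : Option (String × Int) :=
  (cands.find? (fun c => seen.contains c)).map (fun c => (c, (cands.idxOf c : Int)))

-- reference lookup the concrete reverse index realises
def pvLook (m : String) : List (String × List String) → Option (String × Int)
  | [] => none
  | p :: rest => if p.2.contains m then some (p.1, ((p.2.idxOf m : Nat) : Int)) else pvLook m rest

theorem pvL0 (canon m : String) : ∀ (cands : List String), cands.Nodup →
    ∀ (d : PySem.Dict String (String × Int)) (s : Int),
    ((PySem.List.enumerate cands s).foldl (fun d ic => d.insert ic.2 (canon, ic.1)) d).get? m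
      = if cands.contains m then some (canon, s + (cands.idxOf m : Int)) else d.get? m := by
  intro cands
  induction cands with
  | nil => intro _ d s; simp [PySem.List.enumerate_nil]
  | cons c cs ih =>
    intro hnd d s
    rw [PySem.List.enumerate_cons, List.foldl_cons, ih hnd.of_cons]
    by_cases hmc : m = c
    · subst hmc
      have hmcs : m ∉ cs := (List.nodup_cons.mp hnd).1
      simp [hmcs, PySem.Dict.get?_insert_self]
    · by_cases hms : m ∈ cs
      · have hc : cs.contains m = true := by simpa using hms
        have hid : (c :: cs).idxOf m = cs.idxOf m + 1 := List.idxOf_cons_ne _ (fun e => hmc e.symm)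
        simp [hid, hms, Prod.ext_iff]
        omega
      · have hins : (d.insert c (canon, s)).get? m = d.get? m := PySem.Dict.get?_insert_of_ne _ _ hmc
        simp [hms, hmc, hins]

theorem pvL1 : ∀ (cm : List (String × List String)) (d : PySem.Dict String (String × Int)),
    (cm.flatMap (·.2)).Nodup →
    (∀ k ∈ cm.flatMap (·.2), d.get? k = none) → ∀ m,
    (cm.foldl (fun d p =>
      (PySem.List.enumerate p.2).foldl (fun d ic => d.insert ic.2 (p.1, ic.1)) d) d).get? m
      = (d.get? m).or (pvLook m cm) := by
  intro cm
  induction cm with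
  | nil => intro d _ _ m; simp [pvLook]
  | cons p rest ih =>
    intro d hnd hdis m
    have hflat : (p.2 ++ rest.flatMap (·.2)).Nodup := by simpa [List.flatMap_cons] using hnd
    have hp2 : p.2.Nodup := hflat.of_append_left
    have hrest : (rest.flatMap (·.2)).Nodup := hflat.of_append_right
    have hdisj : ∀ k ∈ rest.flatMap (·.2), k ∉ p.2 := by
      intro k hk hkp
      exact (List.disjoint_of_nodup_append hflat) hkp hk
    rw [List.foldl_cons]
    have hd' : ∀ k, ((PySem.List.enumerate p.2).foldl (fun d ic => d.insert ic.2 (p.1, ic.1)) d).get? k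
        = if p.2.contains k then some (p.1, (0 : Int) + (p.2.idxOf k : Int)) else d.get? k :=
      fun k => pvL0 p.1 k p.2 hp2 d 0
    rw [ih ((PySem.List.enumerate p.2).foldl (fun d ic => d.insert ic.2 (p.1, ic.1)) d) hrest
      (fun k hk => by
        rw [hd' k, if_neg (by simpa using hdisj k hk)]
        exact hdis k (by rw [List.flatMap_cons]; exact List.mem_append_right _ hk)) m]
    rw [hd' m]
    by_cases hm : m ∈ p.2
    · have hdm : d.get? m = none := hdis m (by rw [List.flatMap_cons]; exact List.mem_append_left _ hm)
      simp [pvLook, hm, hdm]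
    · simp [pvLook, hm]

theorem pvIndex_get (m : String) : pvIndex.get? m = pvLook m CHANNEL_MAP := by
  have := pvL1 CHANNEL_MAP PySem.Dict.empty pvFlatNodup
    (fun k _ => PySem.Dict.get?_empty _) m
  rw [pvIndexEq]
  simpa [pvBuildIndex, PySem.Dict.get?_empty] using this

theorem pvLook_none {m : String} : ∀ {cm : List (String × List String)},
    pvLook m cm = none → ∀ p ∈ cm, m ∉ p.2 := by
  intro cm
  induction cm with
  | nil => intro _ p hp; cases hp
  | cons q rest ih =>
    intro h p hp
    by_cases hq : m ∈ q.2
    · rw [pvLook, if_pos (by simpa using hq)] at h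
      cases h
    · rw [pvLook, if_neg (by simpa using hq)] at h
      rcases List.mem_cons.mp hp with he | hp
      · rw [he]; exact hq
      · exact ih h p hp

theorem pvLook_some {m canon₀ : String} {i₀ : Int} : ∀ {cm : List (String × List String)},
    (cm.flatMap (·.2)).Nodup → pvLook m cm = some (canon₀, i₀) →
    ∃ cands₀, (canon₀, cands₀) ∈ cm ∧ m ∈ cands₀ ∧ i₀ = (cands₀.idxOf m : Int) ∧
      ∀ q ∈ cm, m ∈ q.2 → q = (canon₀, cands₀) := by
  intro cm
  induction cm with
  | nil => intro _ h; simp [pvLook] at h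
  | cons q rest ih =>
    intro hnd h
    have hflat : (q.2 ++ rest.flatMap (·.2)).Nodup := by simpa [List.flatMap_cons] using hnd
    by_cases hq : m ∈ q.2
    · rw [pvLook, if_pos (by simpa using hq)] at h
      have h1 : q.1 = canon₀ := (Prod.mk.injEq .. ▸ (Option.some.injEq .. ▸ h)).1
      have h2 : ((q.2.idxOf m : Nat) : Int) = i₀ := (Prod.mk.injEq .. ▸ (Option.some.injEq .. ▸ h)).2
      refine ⟨q.2, by simp [← h1], hq, h2.symm, ?_⟩
      intro r hr hmr
      rcases List.mem_cons.mp hr with he | hr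
      · rw [he, ← h1]
      · exact absurd (List.mem_flatMap.mpr ⟨r, hr, hmr⟩)
          (fun hmf => (List.disjoint_of_nodup_append hflat) hq hmf)
    · rw [pvLook, if_neg (by simpa using hq)] at h
      obtain ⟨cands₀, hmem, hm, hi, huniq⟩ := ih hflat.of_append_right h
      refine ⟨cands₀, List.mem_cons_of_mem _ hmem, hm, hi, ?_⟩
      intro r hr hmr
      rcases List.mem_cons.mp hr with he | hr
      · exact absurd (he ▸ hmr) hq
      · exact huniq r hr hmr

theorem pvFind_congr {seen : List String} {m : String} : ∀ {l : List String}, m ∉ l →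
    l.find? (fun c => (seen ++ [m]).contains c) = l.find? (fun c => seen.contains c) := by
  intro l
  induction l with
  | nil => intro _; rfl
  | cons c rest ih =>
    intro h
    have h1 : c ≠ m := fun e => h (by simp [e])
    have h2 : m ∉ rest := fun e => h (by simp [e])
    have hc : ((seen ++ [m]).contains c) = (seen.contains c) := by
      by_cases hcs : c ∈ seen <;> simp [hcs, h1]
    by_cases hp : (seen.contains c) = true
    · rw [List.find?_cons_of_pos (by show ((seen ++ [m]).contains c) = true; rw [hc]; exact hp),
        List.find?_cons_of_pos hp]
    · rw [List.find?_cons_of_neg (by show ¬ ((seen ++ [m]).contains c) = true; rw [hc]; exact hp),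
        List.find?_cons_of_neg hp]
      exact ih h2

-- the key lemma: appending m to the seen input moves the per-canon winner to the better priority
theorem pvK (m : String) : ∀ (cands : List String), cands.Nodup → m ∈ cands → ∀ seen,
    cands.find? (fun c => (seen ++ [m]).contains c)
      = some (match cands.find? (fun c => seen.contains c) with
              | none => m
              | some c₁ => if cands.idxOf m < cands.idxOf c₁ then m else c₁) := by
  intro cands
  induction cands with
  | nil => intro _ hm; cases hm
  | cons c cs ih =>
    intro hnd hm seen
    by_cases hcm : c = m
    · rw [hcm] at hnd ⊢
      have hmcs : m ∉ cs := (List.nodup_cons.mp hnd).1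
      rw [List.find?_cons_of_pos (by show ((seen ++ [m]).contains m) = true; simp)]
      by_cases hs : (seen.contains m) = true
      · rw [List.find?_cons_of_pos hs]
        simp
      · rw [List.find?_cons_of_neg hs]
        cases hfind : cs.find? (fun c' => seen.contains c') with
        | none => simp
        | some c₁ =>
          have hc₁ : c₁ ∈ cs := List.mem_of_find?_eq_some hfind
          have hne : m ≠ c₁ := fun e => hmcs (e ▸ hc₁)
          have h1 : (m :: cs).idxOf c₁ = cs.idxOf c₁ + 1 := List.idxOf_cons_ne _ hne
          simp [h1, List.idxOf_cons_self]
    · have hmcs : m ∈ cs := by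
        rcases List.mem_cons.mp hm with he | h
        · exact absurd he.symm hcm
        · exact h
      have hc : ((seen ++ [m]).contains c) = (seen.contains c) := by
        by_cases h1 : c ∈ seen <;> simp [h1, hcm]
      have hidm : (c :: cs).idxOf m = cs.idxOf m + 1 := List.idxOf_cons_ne _ hcm
      by_cases hs : (seen.contains c) = true
      · rw [List.find?_cons_of_pos (by show ((seen ++ [m]).contains c) = true; rw [hc]; exact hs),
          List.find?_cons_of_pos hs]
        simp [hidm, List.idxOf_cons_self]
      · rw [List.find?_cons_of_neg (by show ¬ ((seen ++ [m]).contains c) = true; rw [hc]; exact hs),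
          List.find?_cons_of_neg hs]
        rw [ih hnd.of_cons hmcs seen]
        cases hfind : cs.find? (fun c' => seen.contains c') with
        | none => simp
        | some c₁ =>
          have hc₁ : c₁ ∈ cs := List.mem_of_find?_eq_some hfind
          have hne : c ≠ c₁ := fun e => (List.nodup_cons.mp hnd).1 (e ▸ hc₁)
          have hid₁ : (c :: cs).idxOf c₁ = cs.idxOf c₁ + 1 := List.idxOf_cons_ne _ hne
          by_cases hlt : cs.idxOf m < cs.idxOf c₁ <;>
            simp [hidm, hid₁, hlt]

theorem pvKeysUnique {k : String} {a b : List String} : ∀ {cm : List (String × List String)},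
    (cm.map (·.1)).Nodup → (k, a) ∈ cm → (k, b) ∈ cm → a = b := by
  intro cm
  induction cm with
  | nil => intro _ ha; cases ha
  | cons q rest ih =>
    intro hnd ha hb
    rw [List.map_cons, List.nodup_cons] at hnd
    rcases List.mem_cons.mp ha with he | ha <;> rcases List.mem_cons.mp hb with he2 | hb
    · injection he.trans he2.symm
    · exact absurd (List.mem_map.mpr ⟨(k, b), hb, by rw [← he]⟩) hnd.1
    · exact absurd (List.mem_map.mpr ⟨(k, a), ha, by rw [← he2]⟩) hnd.1
    · exact ih hnd.2 ha hb

theorem pvStepInv (best : PySem.Dict String (String × Int)) (seen : List String) (m : String)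
    (hinv : ∀ p ∈ CHANNEL_MAP, best.get? p.1 = pvBspec p.2 seen) :
    ∀ p ∈ CHANNEL_MAP, (pvStep best m).get? p.1 = pvBspec p.2 (seen ++ [m]) := by
  intro p hp
  obtain ⟨pk, pcands⟩ := p
  unfold pvStep
  rw [pvIndex_get]
  cases hl : pvLook m CHANNEL_MAP with
  | none =>
    have hnm := pvLook_none hl _ hp
    have hb := hinv _ hp
    simp only [pvBspec] at hb ⊢
    rw [pvFind_congr hnm]
    simpa using hb
  | some v =>
    obtain ⟨canon₀, i₀⟩ := v
    obtain ⟨cands₀, hmem, hmc, hi, huniq⟩ := pvLook_some pvFlatNodup hl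
    by_cases hpc : pk = canon₀
    · subst hpc
      have hce : pcands = cands₀ := pvKeysUnique pvKeysNodup hp hmem
      subst hce
      have hb := hinv _ hp
      have hnd₀ : pcands.Nodup := pvCandsNodup _ hp
      simp only [pvBspec] at hb ⊢
      rw [pvK m pcands hnd₀ hmc seen]
      cases hf : pcands.find? (fun c => seen.contains c) with
      | none =>
        rw [hf] at hb
        simp only [Option.map_none] at hb
        simp [hb, PySem.Dict.get?_insert_self, hi]
      | some c₁ =>
        rw [hf] at hb
        simp only [Option.map_some] at hb
        by_cases hlt : pcands.idxOf m < pcands.idxOf c₁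
        · have hilt : i₀ < ((pcands.idxOf c₁ : Nat) : Int) := by
            rw [hi]; exact_mod_cast hlt
          simp [hb, hlt, PySem.Dict.get?_insert_self, hi]
        · have hilt : ¬ i₀ < ((pcands.idxOf c₁ : Nat) : Int) := by
            rw [hi]; exact_mod_cast hlt
          simp [hb, hlt, hilt]
    · have hnm : m ∉ pcands := fun hmm => hpc (congrArg Prod.fst (huniq (pk, pcands) hp hmm))
      have hget : ∀ v', (best.insert canon₀ v').get? pk = best.get? pk :=
        fun v' => PySem.Dict.get?_insert_of_ne _ _ hpc
      have hb := hinv _ hp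
      simp only [pvBspec] at hb ⊢
      rw [pvFind_congr hnm]
      cases hbg : best.get? canon₀ with
      | none => simpa [hbg, hget] using hb
      | some cur =>
        by_cases hlt : i₀ < cur.2 <;>
          simpa [hbg, hlt, hget] using hb

theorem pvFoldInv : ∀ (ms : List String) (best : PySem.Dict String (String × Int)) (seen : List String),
    (∀ p ∈ CHANNEL_MAP, best.get? p.1 = pvBspec p.2 seen) →
    ∀ p ∈ CHANNEL_MAP, (ms.foldl pvStep best).get? p.1 = pvBspec p.2 (seen ++ ms) := by
  intro ms
  induction ms with
  | nil => intro best seen hinv p hp; simpa using hinv p hp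
  | cons m rest ih =>
    intro best seen hinv p hp
    rw [List.foldl_cons]
    have := ih (pvStep best m) (seen ++ [m]) (pvStepInv best seen m hinv) p hp
    simpa using this

theorem pvB_eq_target (ms : List String) : build_canonical_map_alt ms = pvTarget ms := by
  unfold build_canonical_map_alt pvTarget
  rw [pvCanonEq, List.filterMap_map]
  have hbase : ∀ p ∈ CHANNEL_MAP, (PySem.Dict.empty : PySem.Dict String (String × Int)).get? p.1 = pvBspec p.2 [] := by
    intro p _
    simp [pvBspec, PySem.Dict.get?_empty]
  have h := pvFoldInv ms PySem.Dict.empty [] hbase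
  refine List.filterMap_congr (fun p hp => ?_)
  have := h p hp
  rw [List.nil_append] at this
  show ((ms.foldl pvStep PySem.Dict.empty).get? p.1).map (fun v => (p.1, v.1)) = _
  rw [this]
  simp only [pvBspec, Option.map_map]
  rfl

theorem pvFindCand_eq (ms : List String) : ∀ (cands : List String),
    pvFindCand (PySem.Set.ofList ms) cands = cands.find? (fun c => ms.contains c) := by
  intro cands
  induction cands with
  | nil => rfl
  | cons c cs ih =>
    show (if PySem.Set.contains (PySem.Set.ofList ms) c then some c else pvFindCand _ cs) = _
    by_cases hc : c ∈ ms
    · rw [List.find?_cons_of_pos (by simpa using hc)]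
      simp [PySem.Set.contains_eq_listContains, PySem.Set.mem_ofList, hc]
    · rw [List.find?_cons_of_neg (by simpa using hc), ← ih]
      simp [PySem.Set.contains_eq_listContains, PySem.Set.mem_ofList, hc]

theorem pvA2 (f : String × List String → Option String) : ∀ (cm : List (String × List String))
    (d : PySem.Dict String String), (cm.map (·.1)).Nodup →
    (∀ p ∈ cm, d.contains p.1 = false) →
    (cm.foldl (fun r p => match f p with | some c => r.insert p.1 c | none => r) d).items
      = d.items ++ cm.filterMap (fun p => (f p).map (fun c => (p.1, c))) := by
  intro cm
  induction cm with
  | nil => intro d _ _; simp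
  | cons p rest ih =>
    intro d hnd hfr
    rw [List.map_cons, List.nodup_cons] at hnd
    rw [List.foldl_cons]
    cases hf : f p with
    | none =>
      rw [ih d hnd.2 (fun q hq => hfr q (List.mem_cons_of_mem _ hq))]
      simp [hf]
    | some c =>
      have hfresh : d.contains p.1 = false := hfr p List.mem_cons_self
      rw [ih (d.insert p.1 c) hnd.2 (fun q hq => by
        rw [PySem.Dict.contains_insert]
        have hne : q.1 ≠ p.1 := fun e => hnd.1 (List.mem_map.mpr ⟨q, hq, e⟩)
        simp [hne, hfr q (List.mem_cons_of_mem _ hq)])]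
      rw [PySem.Dict.items_insert_of_not_contains _ _ hfresh]
      simp [hf]

theorem pvA_eq_target (ms : List String) : build_canonical_map ms = pvTarget ms := by
  show ((CHANNEL_MAP.foldl (fun result p =>
      match pvFindCand (PySem.Set.ofList ms) p.2 with
      | some c => result.insert p.1 c
      | none => result) PySem.Dict.empty).items) = pvTarget ms
  rw [pvA2 (fun p => pvFindCand (PySem.Set.ofList ms) p.2) CHANNEL_MAP PySem.Dict.empty
    pvKeysNodup (fun p _ => PySem.Dict.contains_empty _)]
  have hemp : (PySem.Dict.empty : PySem.Dict String String).items = [] := rfl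
  rw [hemp, List.nil_append]
  unfold pvTarget
  exact List.filterMap_congr (fun p _ => by rw [pvFindCand_eq ms p.2])

-- ===== VERDICT (by name: the statement is the Claim_ definition above) =====
theorem build_canonical_map_spec : Claim_equal_build_canonical_map := by
  intro ms _
  unfold Spec_build_canonical_map
  rw [pvA_eq_target, pvB_eq_target]
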